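-- pv_equiv track=rewrite | github.com/hendrikctimmer/gen_prog_mm | Matmul.py | one_sided_h
-- ===== SOURCE A (Python) =====
-- def one_sided_h(h_list):
--
-- 	#Checks whether an h-term has only a's or only b's
--
-- 	num_a = 0
-- 	num_b = 0
--
-- 	for x in h_list:
-- 		if "a" in x:
-- 			num_a +=1
-- 		elif "b" in x:
-- 			num_b +=1
--
-- 	if num_a == 0 or num_b == 0:
-- 		return True
-- 	else:
-- 		return False
-- ===== SOURCE B (Python) =====
-- def one_sided_h(h_list):
--     # Early-exit state machine: remember the kind of the first classified
--     # element ('a' if the element contains 'a', else 'b' if it contains 'b')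
--     # and return False immediately when an element of the opposite kind
--     # appears; no counters, no second condition test at the end.
--     seen = None
--     for x in h_list:
--         kind = 'a' if 'a' in x else ('b' if 'b' in x else None)
--         if kind is not None:
--             if seen is None:
--                 seen = kind
--             elif kind != seen:
--                 return False
--     return True
-- ===== Notes on version B (the rewrite author's own statement) =====
-- stated objective: alternative
-- what changed: Replaces the two integer counters and final zero-test by an early-exit state machine that records the kind ('a' or 'b'-only) of the first classified element and returns False at the first element of the opposite kind; no counter arithmetic, can stop before scanning the whole list.
import Mathlib
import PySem

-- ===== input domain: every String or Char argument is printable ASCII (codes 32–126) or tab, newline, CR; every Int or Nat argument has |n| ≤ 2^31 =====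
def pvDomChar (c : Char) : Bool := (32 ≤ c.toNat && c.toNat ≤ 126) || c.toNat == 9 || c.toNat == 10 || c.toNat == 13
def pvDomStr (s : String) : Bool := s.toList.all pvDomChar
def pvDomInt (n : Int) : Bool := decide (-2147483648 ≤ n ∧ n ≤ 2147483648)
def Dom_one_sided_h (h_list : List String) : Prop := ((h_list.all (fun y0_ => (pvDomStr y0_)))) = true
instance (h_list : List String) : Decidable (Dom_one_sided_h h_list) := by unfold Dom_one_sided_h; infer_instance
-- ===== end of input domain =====

-- B replaces the counter loop by an early-exit state machine over the first seen kind (objective: alternative).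

-- ===== PORT A =====
-- the loop body: if "a" in x: num_a += 1 elif "b" in x: num_b += 1
def one_sided_h_step (st : Int × Int) (x : String) : Int × Int :=
  if PySem.Str.isIn "a" x then (st.1 + 1, st.2)
  else if PySem.Str.isIn "b" x then (st.1, st.2 + 1)
  else st

def one_sided_h (h_list : List String) : Bool :=
  let st := h_list.foldl one_sided_h_step (0, 0)
  if st.1 = 0 ∨ st.2 = 0 then true else false

-- ===== PORT B =====
-- kind of an element: some true = 'a'-element, some false = 'b'-only element, none = neither
def one_sided_h_kind (x : String) : Option Bool :=
  if PySem.Str.isIn "a" x then some true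
  else if PySem.Str.isIn "b" x then some false
  else none

-- the loop with early return, as structural recursion carrying `seen`
def one_sided_h_go : List String → Option Bool → Bool
  | [], _ => true
  | x :: rest, seen =>
    match one_sided_h_kind x with
    | none => one_sided_h_go rest seen
    | some k =>
      match seen with
      | none => one_sided_h_go rest (some k)
      | some s => if k ≠ s then false else one_sided_h_go rest seen

def one_sided_h_alt (h_list : List String) : Bool :=
  one_sided_h_go h_list none

-- ===== PRECONDITION & SPEC =====
def Spec_one_sided_h (h_list : List String) (out : Bool) : Prop := out = one_sided_h_alt h_list
instance (h_list : List String) (out : Bool) : Decidable (Spec_one_sided_h h_list out) := by unfold Spec_one_sided_h; infer_instance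

-- ===== CLAIM (what is proved, stated in full; the proofs are below) =====
def Claim_equal_one_sided_h : Prop := ∀ (h_list : List String), Dom_one_sided_h h_list → Spec_one_sided_h h_list (one_sided_h h_list)

-- ===== LEMMAS AND PROOFS =====

-- A's fold computes the two counts (as Int offsets of the starting state)
theorem one_sided_h_foldl (l : List String) (na nb : Int) :
    l.foldl one_sided_h_step (na, nb) =
      (na + (l.countP (fun x => PySem.Str.isIn "a" x) : Int),
       nb + (l.countP (fun x => PySem.Str.isIn "b" x && !PySem.Str.isIn "a" x) : Int)) := by
  induction l generalizing na nb with
  | nil => simp [List.countP]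
  | cons x xs ih =>
    simp only [List.foldl_cons, one_sided_h_step, List.countP_cons, PySem.Str.isIn_eq]
    by_cases ha : PySem.Chars.isIn "a".toList x.toList = true
    · rw [if_pos ha, ih]
      simp at ha
      simp [ha]
      ring
    · rw [if_neg ha]
      by_cases hb : PySem.Chars.isIn "b".toList x.toList = true
      · rw [if_pos hb, ih]
        simp at ha hb
        simp [ha, hb]
        ring
      · rw [if_neg hb, ih]
        simp at ha hb
        simp [ha, hb]

-- once a kind is seen, B's loop returns true iff no element of the opposite kind follows
theorem one_sided_h_go_seen (l : List String) (s : Bool) :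
    one_sided_h_go l (some s) =
      !(l.any (fun x => one_sided_h_kind x == some (!s))) := by
  induction l with
  | nil => simp [one_sided_h_go]
  | cons x xs ih =>
    simp only [one_sided_h_go, List.any_cons]
    cases hk : one_sided_h_kind x with
    | none => simp [hk, ih]
    | some k =>
      by_cases hks : k = s
      · subst hks; simp [hk, ih]
      · have : k = !s := by cases k <;> cases s <;> simp_all
        subst this
        simp [hk]

-- B's loop from the initial state returns true iff not both kinds occur
theorem one_sided_h_go_none (l : List String) :
    one_sided_h_go l none =
      !((l.any (fun x => one_sided_h_kind x == some true)) &&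
        (l.any (fun x => one_sided_h_kind x == some false))) := by
  induction l with
  | nil => simp [one_sided_h_go]
  | cons x xs ih =>
    simp only [one_sided_h_go, List.any_cons]
    cases hk : one_sided_h_kind x with
    | none => simp [hk, ih]
    | some k =>
      cases k <;> simp [hk, one_sided_h_go_seen]

-- the kind tests coincide with the predicates counted by A
theorem one_sided_h_kind_true (x : String) :
    (one_sided_h_kind x == some true) = PySem.Str.isIn "a" x := by
  unfold one_sided_h_kind
  cases ha : PySem.Str.isIn "a" x <;> cases hb : PySem.Str.isIn "b" x <;>
    simp [ha, hb]

theorem one_sided_h_kind_false (x : String) :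
    (one_sided_h_kind x == some false) = (PySem.Str.isIn "b" x && !PySem.Str.isIn "a" x) := by
  unfold one_sided_h_kind
  cases ha : PySem.Str.isIn "a" x <;> cases hb : PySem.Str.isIn "b" x <;>
    simp [ha, hb]

theorem countP_zero_iff_any_false (l : List String) (p : String → Bool) :
    (l.countP p = 0) ↔ l.any p = false := by
  simp [List.countP_eq_zero, List.any_eq_false]

-- ===== VERDICT (by name: the statement is the Claim_ definition above) =====
theorem one_sided_h_spec : Claim_equal_one_sided_h := by
  intro h_list _
  unfold Spec_one_sided_h one_sided_h one_sided_h_alt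
  rw [one_sided_h_foldl, one_sided_h_go_none]
  simp only [zero_add, one_sided_h_kind_true, one_sided_h_kind_false]
  split_ifs with h
  · rcases h with h | h
    · have hc : h_list.countP (fun x => PySem.Str.isIn "a" x) = 0 := by exact_mod_cast h
      have hany := (countP_zero_iff_any_false h_list _).mp hc
      simp at hany ⊢
      exact Or.inl hany
    · have hc : h_list.countP (fun x => PySem.Str.isIn "b" x && !PySem.Str.isIn "a" x) = 0 := by
        exact_mod_cast h
      have hany := (countP_zero_iff_any_false h_list _).mp hc
      simp at hany ⊢
      exact Or.inr hany
  · push_neg at h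
    obtain ⟨h1, h2⟩ := h
    have a1 : h_list.any (fun x => PySem.Str.isIn "a" x) = true := by
      rcases Bool.eq_false_or_eq_true (h_list.any (fun x => PySem.Str.isIn "a" x)) with hx | hx
      · exact hx
      · exact absurd (by exact_mod_cast (countP_zero_iff_any_false h_list _).mpr hx) h1
    have a2 : h_list.any (fun x => PySem.Str.isIn "b" x && !PySem.Str.isIn "a" x) = true := by
      rcases Bool.eq_false_or_eq_true
          (h_list.any (fun x => PySem.Str.isIn "b" x && !PySem.Str.isIn "a" x)) with hx | hx
      · exact hx
      · exact absurd (by exact_mod_cast (countP_zero_iff_any_false h_list _).mpr hx) h2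
    simp at a1 a2 ⊢
    exact ⟨a1, a2⟩
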